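-- pv_equiv track=rewrite | github.com/ArkadyBIG/chequeProgram | Parser/default_parser_methods/parse_telephone_number.py | _find_line_of_numbers
-- ===== SOURCE A (Python) =====
-- def _find_line_of_numbers(data):
--     lines = []
--     for i, text in enumerate(data['text']):
--         if text:
--             if i and data['text'][i - 1]:
--                 lines[-1].append(i)
--             else:
--                 lines.append([i])
--
--     if not lines:
--         return None
--     # if len(lines) > 1:
--     #     scores = []
--     #     for i, line in enumerate(lines):
--     #         text_line = [data['text'][i] for i in line]
--     #         score = phone_score(text_line)
--     #         scores.append(score + 20 * i)
--     #     # scores[-1] += 30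
--     #     # if max(scores) < 0:
--     #     #     return None
--     #     # lines_score = zip(lines, scores)
--     #     # lines_score = sorted(lines_score, key=lambda x: x[1], reverse=True)
--     #     return [i[0] for i in lines_score]
--     # else:
--     #     number_indxs = [lines[0]]
--
--     return lines[::-1]
-- ===== SOURCE B (Python) =====
-- def _find_line_of_numbers(data):
--     flags = [bool(t) for t in data['text']]
--     starts = [i for i, (p, c) in enumerate(zip([False] + flags, flags)) if c and not p]
--     ends = [i for i, (c, nx) in enumerate(zip(flags, flags[1:] + [False])) if c and not nx]
--     if not starts:
--         return None
--     return [list(range(s, e + 1)) for s, e in zip(reversed(starts), reversed(ends))]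
-- ===== Notes on version B (the rewrite author's own statement) =====
-- stated objective: alternative
-- what changed: Replaces A's incremental run-growing loop (look-back at text[i-1] deciding append-to-last vs new group) with a staged boundary computation: truthiness flags are zipped against their left and right shifts to extract run-start and run-end index lists, which are then paired in reverse and expanded to ranges, so no group list is ever grown element by element.
import Mathlib
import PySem

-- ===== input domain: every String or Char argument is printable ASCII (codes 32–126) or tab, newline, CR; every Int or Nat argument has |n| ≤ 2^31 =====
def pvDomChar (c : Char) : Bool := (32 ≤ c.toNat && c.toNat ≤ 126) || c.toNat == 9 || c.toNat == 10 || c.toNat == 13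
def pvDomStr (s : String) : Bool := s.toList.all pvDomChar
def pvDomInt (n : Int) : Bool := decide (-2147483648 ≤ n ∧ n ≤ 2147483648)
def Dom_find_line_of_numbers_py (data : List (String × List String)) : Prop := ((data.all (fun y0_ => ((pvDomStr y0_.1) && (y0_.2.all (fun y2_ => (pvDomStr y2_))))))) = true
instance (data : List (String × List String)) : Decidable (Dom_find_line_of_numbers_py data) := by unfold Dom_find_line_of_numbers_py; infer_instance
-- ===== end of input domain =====

-- B replaces A's incremental run-growing loop (look-back glue on text[i-1]) with a staged
-- boundary computation: run starts and run ends are extracted by zipping the truthiness flags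
-- with their shifts, then paired in reverse and expanded to ranges; same cost, different algorithm.
-- ===== PORT A =====
-- one loop step of A's 'for i, text in enumerate(data['text'])'
def pvAStep (texts : List String) (lines : List (List Int)) (p : Int × String) : List (List Int) :=
  if p.2 ≠ "" then
    if p.1 ≠ 0 ∧ PySem.List.pyGetD texts (p.1 - 1) "" ≠ "" then
      -- lines[-1].append(i)   (lines is non-empty here whenever the Python reaches this line)
      lines.dropLast ++ [(lines.getLast?.getD []) ++ [p.1]]
    else lines ++ [[p.1]]
  else lines

def find_line_of_numbers_py (data : List (String × List String)) : Option (List (List Int)) :=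
  match (PySem.Dict.mk data).get? "text" with
  | none => none   -- KeyError: data['text'] missing; excluded by Pre_
  | some texts =>
    let lines := (PySem.List.enumerate texts 0).foldl (pvAStep texts) []
    if lines = [] then none
    else PySem.List.slice? lines none none (-1)   -- lines[::-1]

-- ===== PORT B =====
-- starts = [i for i, (p, c) in enumerate(zip([False] + flags, flags)) if c and not p]
def pvStarts (flags : List Bool) : List Int :=
  ((PySem.List.enumerate ((false :: flags).zip flags) 0).filter
    (fun p => p.2.2 && !p.2.1)).map (fun p => p.1)

-- ends = [i for i, (c, nx) in enumerate(zip(flags, flags[1:] + [False])) if c and not nx]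
def pvEnds (flags : List Bool) : List Int :=
  ((PySem.List.enumerate (flags.zip (PySem.List.slice flags (some 1) none ++ [false])) 0).filter
    (fun p => p.2.1 && !p.2.2)).map (fun p => p.1)

def find_line_of_numbers_py_alt (data : List (String × List String)) : Option (List (List Int)) :=
  match (PySem.Dict.mk data).get? "text" with
  | none => none   -- KeyError: data['text'] missing; excluded by Pre_
  | some texts =>
    let flags := texts.map (fun t => t != "")   -- bool(t) for a string is t != ""
    let starts := pvStarts flags
    let ends := pvEnds flags
    if starts = [] then none
    else some ((starts.reverse.zip ends.reverse).map
      (fun p => PySem.List.pyRange p.1 (p.2 + 1) 1))   -- list(range(s, e + 1))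

-- ===== PRECONDITION & SPEC =====
-- A raises KeyError when the key "text" is absent; exactly those inputs are excluded.
def Pre_find_line_of_numbers_py (data : List (String × List String)) : Prop :=
  ((PySem.Dict.mk data).get? "text").isSome = true
instance (data : List (String × List String)) : Decidable (Pre_find_line_of_numbers_py data) := by
  unfold Pre_find_line_of_numbers_py; infer_instance
def pvWitness_find_line_of_numbers_py : (List (String × List String)) :=
  [("text", ["12", "", "3"])]

def Spec_find_line_of_numbers_py (data : List (String × List String)) (out : Option (List (List Int))) : Prop := out = find_line_of_numbers_py_alt data
instance (data : List (String × List String)) (out : Option (List (List Int))) : Decidable (Spec_find_line_of_numbers_py data out) := by unfold Spec_find_line_of_numbers_py; infer_instance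

-- ===== CLAIM (what is proved, stated in full; the proofs are below) =====
def Claim_equal_find_line_of_numbers_py : Prop := ∀ (data : List (String × List String)), Dom_find_line_of_numbers_py data → Pre_find_line_of_numbers_py data → Spec_find_line_of_numbers_py data (find_line_of_numbers_py data)

-- ===== LEMMAS AND PROOFS =====

-- recursive characterisation of the start-index comprehension (prev = flag of the previous entry)
def pvSAux (prev : Bool) (i : Int) : List Bool → List Int
  | [] => []
  | c :: r => (if c && !prev then [i] else []) ++ pvSAux c (i + 1) r

-- recursive characterisation of the end-index comprehension (lookahead at the next flag)
def pvEAux (i : Int) : List Bool → List Int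
  | [] => []
  | c :: r => (if c && !(r.headD false) then [i] else []) ++ pvEAux (i + 1) r

-- (start, end) pairs of the maximal true-runs; F = no run open, T = run open since s
mutual
def pvPairsF (i : Int) : List Bool → List (Int × Int)
  | [] => []
  | c :: r => if c then pvPairsT i (i + 1) r else pvPairsF (i + 1) r
def pvPairsT (s i : Int) : List Bool → List (Int × Int)
  | [] => [(s, i - 1)]
  | c :: r => if c then pvPairsT s (i + 1) r else (s, i - 1) :: pvPairsF (i + 1) r
end

-- the starts comprehension equals pvSAux
theorem pvStarts_eq (flags : List Bool) (prev : Bool) (i : Int) :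
    ((PySem.List.enumerate ((prev :: flags).zip flags) i).filter
      (fun p => p.2.2 && !p.2.1)).map (fun p => p.1) = pvSAux prev i flags := by
  induction flags generalizing prev i with
  | nil => simp [pvSAux]
  | cons c r ih =>
    rw [show (prev :: c :: r).zip (c :: r) = (prev, c) :: (c :: r).zip r from rfl,
      PySem.List.enumerate_cons]
    simp only [List.filter_cons, pvSAux]
    by_cases h : (c && !prev) = true
    · rw [if_pos h, if_pos h, List.map_cons, ih c (i + 1)]; rfl
    · rw [if_neg h, if_neg h, ih c (i + 1), List.nil_append]

-- the ends comprehension equals pvEAux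
theorem pvEnds_eq (flags : List Bool) (i : Int) :
    ((PySem.List.enumerate (flags.zip (flags.tail ++ [false])) i).filter
      (fun p => p.2.1 && !p.2.2)).map (fun p => p.1) = pvEAux i flags := by
  induction flags generalizing i with
  | nil => simp [pvEAux]
  | cons c r ih =>
    cases r with
    | nil =>
      simp [PySem.List.enumerate_cons, List.filter_cons, pvEAux]
      by_cases h : c = true <;> simp [h]
    | cons d r' =>
      rw [show (c :: d :: r').zip ((c :: d :: r').tail ++ [false]) =
          (c, d) :: (d :: r').zip ((d :: r').tail ++ [false]) from rfl,
        PySem.List.enumerate_cons]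
      simp only [List.filter_cons, pvEAux, List.headD_cons]
      by_cases h : (c && !d) = true
      · rw [if_pos h, if_pos h, List.map_cons, ih (i + 1)]; rfl
      · rw [if_neg h, if_neg h, ih (i + 1), List.nil_append]
        simp [pvEAux]

-- the zip of starts and ends is exactly the run pairs (closed state; open state as second conjunct)
theorem pvZip_eq (flags : List Bool) (i : Int) :
    (pvSAux false i flags).zip (pvEAux i flags) = pvPairsF i flags ∧
    (∀ s, flags.headD false = true →
      ((s :: pvSAux true i flags).zip (pvEAux i flags) = pvPairsT s i flags)) := by
  induction flags generalizing i with
  | nil => exact ⟨rfl, fun s h => by simp at h⟩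
  | cons c r ih =>
    constructor
    · cases c with
      | false => simpa [pvSAux, pvEAux, pvPairsF] using (ih (i + 1)).1
      | true =>
        cases r with
        | nil => simp [pvSAux, pvEAux, pvPairsF, pvPairsT]
        | cons d r' =>
          cases d with
          | true =>
            have h2 := (ih (i + 1)).2 i (by simp)
            simpa [pvSAux, pvEAux, pvPairsF] using h2
          | false =>
            have h1 := (ih (i + 1)).1
            simp [pvSAux, pvEAux, pvPairsF] at h1
            simp [pvSAux, pvEAux, pvPairsF, pvPairsT, h1]
    · intro s h
      have hc : c = true := by simpa using h
      subst hc
      cases r with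
      | nil => simp [pvSAux, pvEAux, pvPairsT]
      | cons d r' =>
        cases d with
        | true =>
          have h2 := (ih (i + 1)).2 s (by simp)
          simpa [pvSAux, pvEAux, pvPairsT] using h2
        | false =>
          have h1 := (ih (i + 1)).1
          simp [pvSAux, pvEAux, pvPairsF] at h1
          simp [pvSAux, pvEAux, pvPairsF, pvPairsT, h1]

-- starts and ends have equal length (closed state); one extra end in the open state
theorem pvLen_eq (flags : List Bool) (i : Int) :
    (pvSAux false i flags).length = (pvEAux i flags).length ∧
    (flags.headD false = true →
      (pvEAux i flags).length = (pvSAux true i flags).length + 1) := by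
  induction flags generalizing i with
  | nil => exact ⟨rfl, fun h => by simp at h⟩
  | cons c r ih =>
    constructor
    · cases c with
      | false => simpa [pvSAux, pvEAux] using (ih (i + 1)).1
      | true =>
        cases r with
        | nil => simp [pvSAux, pvEAux]
        | cons d r' =>
          cases d with
          | true =>
            have h2 := (ih (i + 1)).2 (by simp)
            simp [pvSAux, pvEAux] at h2 ⊢
            omega
          | false =>
            have h1 := (ih (i + 1)).1
            simp [pvSAux, pvEAux] at h1 ⊢
            omega
    · intro h
      have hc : c = true := by simpa using h
      subst hc
      cases r with
      | nil => simp [pvSAux, pvEAux]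
      | cons d r' =>
        cases d with
        | true =>
          have h2 := (ih (i + 1)).2 (by simp)
          simp [pvSAux, pvEAux] at h2 ⊢
          omega
        | false =>
          have h1 := (ih (i + 1)).1
          simp [pvSAux, pvEAux] at h1 ⊢
          omega

-- zip of reverses is the reverse of the zip, for equal lengths
theorem pvZipReverse {α β : Type} (l1 : List α) (l2 : List β) (h : l1.length = l2.length) :
    l1.reverse.zip l2.reverse = (l1.zip l2).reverse := by
  induction l1 generalizing l2 with
  | nil => cases l2 with | nil => rfl | cons b t => simp at h
  | cons a t ih =>
    cases l2 with
    | nil => simp at h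
    | cons b t2 =>
      have ht : t.length = t2.length := by simpa using h
      simp only [List.reverse_cons, List.zip_cons_cons]
      rw [List.zip_append (by simpa using ht), ih t2 ht]
      simp

-- drop k of the enumerated list exposes element (k, texts[k])
theorem pvEnumDrop (texts : List String) (k : Nat) (hk : k < texts.length) :
    (PySem.List.enumerate texts 0).drop k =
      ((k : Int), texts[k]) :: (PySem.List.enumerate texts 0).drop (k + 1) := by
  have hlen : k < (PySem.List.enumerate texts 0).length := by
    simp [PySem.List.length_enumerate]; omega
  rw [List.drop_eq_getElem_cons hlen]
  simp [PySem.List.getElem_enumerate]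

-- the main fold lemma: A's fold from position m equals the run-pair expansion;
-- st = none : no run open (texts[m-1] empty or m = 0); st = some s : run open since s
def pvInit (st : Option Int) (m : Int) : List (List Int) :=
  match st with | none => [] | some s => [PySem.List.pyRange s m 1]

def pvPairsO (st : Option Int) (m : Int) (l : List Bool) : List (Int × Int) :=
  match st with | none => pvPairsF m l | some s => pvPairsT s m l

theorem pvFold (texts : List String) (m : Int) (acc : List (List Int)) (st : Option Int)
    (h0 : 0 ≤ m)
    (hnone : st = none → (m = 0 ∨ PySem.List.pyGetD texts (m - 1) "" = ""))
    (hsome : ∀ s, st = some s → 0 ≤ s ∧ s < m ∧ PySem.List.pyGetD texts (m - 1) "" ≠ "") :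
    ((PySem.List.enumerate texts 0).drop m.toNat).foldl (pvAStep texts) (acc ++ pvInit st m) =
      acc ++ (pvPairsO st m ((texts.map (fun t => t != "")).drop m.toNat)).map
        (fun (p : Int × Int) => PySem.List.pyRange p.1 (p.2 + 1) 1) := by
  by_cases hm : m.toNat < texts.length
  · have hcast : ((m.toNat : Int)) = m := by omega
    have hget : PySem.List.pyGetD texts m "" = texts[m.toNat] := by
      rw [PySem.List.pyGetD_eq_getElem texts "" h0 (by omega)]
    have hdropF : (texts.map (fun t => t != "")).drop m.toNat =
        (texts[m.toNat] != "") :: (texts.map (fun t => t != "")).drop (m.toNat + 1) := by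
      rw [List.drop_eq_getElem_cons (by simpa using hm)]; simp
    have hnext : m.toNat + 1 = (m + 1).toNat := by omega
    rw [pvEnumDrop texts m.toNat hm, List.foldl_cons, hdropF]
    by_cases hne : texts[m.toNat] = ""
    · -- empty entry: any open run closes, lines unchanged
      have hflag : (texts[m.toNat] != "") = false := by simp [hne]
      rw [hflag]
      have hstep : ∀ L, pvAStep texts L ((m.toNat : Int), texts[m.toNat]) = L := by
        intro L; simp [pvAStep, hne]
      rw [hstep]
      have hprev1 : PySem.List.pyGetD texts (m + 1 - 1) "" = "" := by
        rw [show m + 1 - 1 = m from by omega, hget]; exact hne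
      cases st with
      | none =>
        have hrec := pvFold texts (m + 1) acc none (by omega)
          (fun _ => Or.inr hprev1) (fun s hs => by simp at hs)
        simp only [pvInit, List.append_nil] at hrec ⊢
        rw [hnext, hrec]
        simp [pvPairsO, pvPairsF]
      | some s =>
        obtain ⟨hs0, hsm, _⟩ := hsome s rfl
        have hrec := pvFold texts (m + 1) (acc ++ [PySem.List.pyRange s m 1]) none (by omega)
          (fun _ => Or.inr hprev1) (fun s' hs => by simp at hs)
        simp only [pvInit, List.append_nil] at hrec ⊢
        rw [hnext, hrec]
        simp only [pvPairsO, pvPairsT]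
        rw [if_neg (Bool.false_ne_true)]
        simp [List.append_assoc, show m - 1 + 1 = m from by omega]
    · -- non-empty entry
      have hflag : (texts[m.toNat] != "") = true := by simp [hne]
      rw [hflag]
      have hprev1 : PySem.List.pyGetD texts (m + 1 - 1) "" ≠ "" := by
        rw [show m + 1 - 1 = m from by omega, hget]; exact hne
      cases st with
      | none =>
        -- a new run opens at m
        have hcond : ¬ (m ≠ 0 ∧ PySem.List.pyGetD texts (m - 1) "" ≠ "") := by
          rcases hnone rfl with h | h
          · intro hc; exact hc.1 h
          · intro hc; exact hc.2 h
        have hstep : ∀ L, pvAStep texts L ((m.toNat : Int), texts[m.toNat]) = L ++ [[m]] := by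
          intro L
          simp only [pvAStep, hcast]
          rw [if_pos hne, if_neg hcond]
        simp only [pvInit, List.append_nil]
        rw [hstep acc]
        have hrec := pvFold texts (m + 1) acc (some m) (by omega)
          (fun h => by simp at h)
          (fun s' hs => by cases hs; exact ⟨by omega, by omega, hprev1⟩)
        simp only [pvInit] at hrec
        rw [show PySem.List.pyRange m (m + 1) 1 = [m] from
          PySem.List.pyRange_one_singleton m] at hrec
        rw [hnext, hrec]
        simp [pvPairsO, pvPairsF]
      | some s =>
        -- the run continues: append m to the last group
        obtain ⟨hs0, hsm, hprev⟩ := hsome s rfl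
        have hcond : (m ≠ 0 ∧ PySem.List.pyGetD texts (m - 1) "" ≠ "") := ⟨by omega, hprev⟩
        have hstep : pvAStep texts (acc ++ [PySem.List.pyRange s m 1])
            ((m.toNat : Int), texts[m.toNat]) = acc ++ [PySem.List.pyRange s (m + 1) 1] := by
          simp only [pvAStep, hcast]
          rw [if_pos hne, if_pos hcond, List.dropLast_concat, List.getLast?_concat]
          simp only [Option.getD_some]
          rw [PySem.List.pyRange_one_succ_right (show s ≤ m from by omega)]
        simp only [pvInit]
        rw [hstep]
        have hrec := pvFold texts (m + 1) acc (some s) (by omega)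
          (fun h => by simp at h)
          (fun s' hs => by cases hs; exact ⟨hs0, by omega, hprev1⟩)
        simp only [pvInit] at hrec
        rw [hnext, hrec]
        simp [pvPairsO, pvPairsT]
  · -- past the end: nothing left to fold
    have hdrop : (PySem.List.enumerate texts 0).drop m.toNat = [] := by
      apply List.drop_eq_nil_of_le
      simp [PySem.List.length_enumerate]; omega
    have hdropF : (texts.map (fun t => t != "")).drop m.toNat = [] := by
      apply List.drop_eq_nil_of_le; simp; omega
    rw [hdrop, hdropF, List.foldl_nil]
    cases st with
    | none => simp [pvInit, pvPairsO, pvPairsF]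
    | some s => simp [pvInit, pvPairsO, pvPairsT, show m - 1 + 1 = m from by omega]
termination_by (texts.length - m.toNat)
decreasing_by all_goals omega

-- ===== VERDICT (by name: the statement is the Claim_ definition above) =====
theorem find_line_of_numbers_py_spec : Claim_equal_find_line_of_numbers_py := by
  intro data _hdom hpre
  unfold Spec_find_line_of_numbers_py find_line_of_numbers_py find_line_of_numbers_py_alt
  cases hget : (PySem.Dict.mk data).get? "text" with
  | none => rfl
  | some texts =>
    simp only []
    set flags := texts.map (fun t => t != "") with hflags
    have hfold := pvFold texts 0 [] none (by omega) (fun _ => Or.inl rfl)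
      (fun s hs => by simp at hs)
    simp only [pvInit, pvPairsO, Int.toNat_zero, List.drop_zero, List.append_nil,
      List.nil_append] at hfold
    rw [← hflags] at hfold
    have hstarts : pvStarts flags = pvSAux false 0 flags := pvStarts_eq flags false 0
    have hends : pvEnds flags = pvEAux 0 flags := by
      unfold pvEnds
      rw [PySem.List.slice_from_one]
      exact pvEnds_eq flags 0
    have hzip := (pvZip_eq flags 0).1
    have hlen := (pvLen_eq flags 0).1
    rw [hfold, hstarts, hends]
    rw [pvZipReverse _ _ hlen, hzip]
    by_cases hnil : pvSAux false 0 flags = []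
    · have hpairs : pvPairsF 0 flags = [] := by
        rw [← hzip, hnil]; rfl
      simp [hnil, hpairs]
    · have hpairs : pvPairsF 0 flags ≠ [] := by
        intro h
        rw [← hzip] at h
        rcases List.zip_eq_nil_iff.mp h with h1 | h2
        · exact hnil h1
        · exact hnil (List.length_eq_zero_iff.mp (by rw [hlen, h2]; rfl))
      have hlines : (pvPairsF 0 flags).map
          (fun (p : Int × Int) => PySem.List.pyRange p.1 (p.2 + 1) 1) ≠ [] := by
        simpa using hpairs
      rw [if_neg hlines, if_neg hnil]
      rw [PySem.List.slice?_none_none_neg_one]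
      rw [List.map_reverse]
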